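-- pv_equiv track=rewrite | github.com/hzhe0083-source/RoboClaw | roboclaw/data/curation/prototypes.py | _summarize_distance_backend
-- ===== SOURCE A (Python) =====
-- def _summarize_distance_backend(backend_counts: dict[str, int]) -> str:
--     active = {backend for backend, count in backend_counts.items() if count > 0}
--     if not active:
--         return "cpu"
--     if len(active) == 1:
--         return next(iter(active))
--     if any("cuda" in backend for backend in active):
--         return "mixed_cuda_cpu"
--     return "mixed"
-- ===== SOURCE B (Python) =====
-- def _summarize_distance_backend(backend_counts: dict[str, int]) -> str:
--     items = list(backend_counts.items())
--     first = next((i for i, (_, c) in enumerate(items) if c > 0), None)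
--     if first is None:
--         return "cpu"
--     if all(c <= 0 for _, c in items[first + 1:]):
--         return items[first][0]
--     if any(c > 0 and "cuda" in b for b, c in items):
--         return "mixed_cuda_cpu"
--     return "mixed"
-- ===== Notes on version B (the rewrite author's own statement) =====
-- stated objective: alternative
-- what changed: Three staged short-circuit searches over the items (find the first active index, check that no later item is active, then search for an active cuda backend) replace A's construction of a set of active names followed by len/next/any re-scans of that set.
import Mathlib
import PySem

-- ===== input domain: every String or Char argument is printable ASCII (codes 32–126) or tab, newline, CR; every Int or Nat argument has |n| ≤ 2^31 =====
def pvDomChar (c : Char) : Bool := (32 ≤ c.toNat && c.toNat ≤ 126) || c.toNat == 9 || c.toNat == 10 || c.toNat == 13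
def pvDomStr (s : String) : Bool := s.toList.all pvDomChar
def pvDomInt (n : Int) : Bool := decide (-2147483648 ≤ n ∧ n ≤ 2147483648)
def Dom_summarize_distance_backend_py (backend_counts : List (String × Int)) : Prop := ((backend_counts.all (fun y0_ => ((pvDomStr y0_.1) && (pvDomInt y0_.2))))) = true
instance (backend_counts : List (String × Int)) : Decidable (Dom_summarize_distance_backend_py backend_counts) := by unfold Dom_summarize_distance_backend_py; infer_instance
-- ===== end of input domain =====

-- B replaces A's active-set construction + re-scans by three staged short-circuit
-- searches over the items; objective: alternative. Return values agree on all dict inputs.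

-- ===== PORT A =====
def summarize_distance_backend_py (backend_counts : List (String × Int)) : String :=
  -- active = {backend for backend, count in backend_counts.items() if count > 0}
  let active : PySem.Set String :=
    PySem.Set.ofList ((backend_counts.filter (fun p => p.2 > 0)).map Prod.fst)
  if active.isEmpty then "cpu"
  else if PySem.Set.len active = 1 then active.headD ""   -- next(iter(active)) on a 1-element set
  else if active.any (fun b => PySem.Str.isIn "cuda" b) then "mixed_cuda_cpu"
  else "mixed"

-- ===== PORT B =====
def summarize_distance_backend_py_alt (backend_counts : List (String × Int)) : String :=
  -- first = next((i for i, (_, c) in enumerate(items) if c > 0), None)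
  match backend_counts.findIdx? (fun p => p.2 > 0) with
  | none => "cpu"
  | some first =>
    -- all(c <= 0 for _, c in items[first + 1:])
    if (backend_counts.drop (first + 1)).all (fun p => p.2 ≤ 0) then
      -- items[first][0]; first is a valid index by construction, so getD never defaults
      (backend_counts.getD first ("", 0)).1
    else if backend_counts.any (fun p => p.2 > 0 && PySem.Str.isIn "cuda" p.1) then
      "mixed_cuda_cpu"
    else "mixed"

-- ===== PRECONDITION & SPEC =====
-- Pre_ excludes association lists with duplicate keys, which do not represent any Python dict
-- (dict keys are unique); A's set there deduplicates while B walks raw entries, and neither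
-- behaviour corresponds to the Python source, so such lists are outside the claim.
def Pre_summarize_distance_backend_py (backend_counts : List (String × Int)) : Prop :=
  (backend_counts.map Prod.fst).Nodup
instance (backend_counts : List (String × Int)) : Decidable (Pre_summarize_distance_backend_py backend_counts) := by unfold Pre_summarize_distance_backend_py; infer_instance
def pvWitness_summarize_distance_backend_py : (List (String × Int)) := [("cpu", 2), ("cuda:0", 1)]

def Spec_summarize_distance_backend_py (backend_counts : List (String × Int)) (out : String) : Prop := out = summarize_distance_backend_py_alt backend_counts
instance (backend_counts : List (String × Int)) (out : String) : Decidable (Spec_summarize_distance_backend_py backend_counts out) := by unfold Spec_summarize_distance_backend_py; infer_instance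

-- ===== CLAIM (what is proved, stated in full; the proofs are below) =====
def Claim_equal_summarize_distance_backend_py : Prop := ∀ (backend_counts : List (String × Int)), Dom_summarize_distance_backend_py backend_counts → Pre_summarize_distance_backend_py backend_counts → Spec_summarize_distance_backend_py backend_counts (summarize_distance_backend_py backend_counts)

-- ===== LEMMAS AND PROOFS =====

-- reference function of the list of active names (proof-only helper)
def pvRef (xs : List String) : String :=
  if xs.isEmpty then "cpu"
  else if xs.length = 1 then xs.headD ""
  else if xs.any (fun b => PySem.Str.isIn "cuda" b) then "mixed_cuda_cpu"
  else "mixed"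

theorem pvA_eq_ref (bc : List (String × Int))
    (hnd : (bc.map Prod.fst).Nodup) :
    summarize_distance_backend_py bc = pvRef ((bc.filter (fun p => p.2 > 0)).map Prod.fst) := by
  have hsub : ((bc.filter (fun p => p.2 > 0)).map Prod.fst).Sublist (bc.map Prod.fst) :=
    List.filter_sublist.map Prod.fst
  have hxs : ((bc.filter (fun p => p.2 > 0)).map Prod.fst).Nodup := hnd.sublist hsub
  unfold summarize_distance_backend_py pvRef
  simp only [PySem.Set.ofList_eq_self_of_nodup _ hxs, PySem.Set.len, List.isEmpty_iff]
  generalize (bc.filter (fun p => p.2 > 0)).map Prod.fst = xs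
  rcases xs with _ | ⟨a, xs⟩ <;> simp

theorem pvB_eq_ref (bc : List (String × Int)) :
    summarize_distance_backend_py_alt bc = pvRef ((bc.filter (fun p => p.2 > 0)).map Prod.fst) := by
  induction bc with
  | nil => rfl
  | cons p bc ih =>
    unfold summarize_distance_backend_py_alt
    by_cases hp : p.2 > 0
    · simp only [List.findIdx?_cons, if_pos, List.filter_cons,
        decide_eq_true hp, List.map_cons, List.drop_succ_cons, List.drop_zero,
        List.getD_cons_zero]
      by_cases hall : (bc.all fun q => decide (q.2 ≤ 0)) = true
      · have hfe : bc.filter (fun q => decide (q.2 > 0)) = [] := by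
          simp only [List.filter_eq_nil_iff]
          intro q hq
          have := (List.all_eq_true.mp hall) q hq
          simpa using this
        rw [if_pos hall]
        simp [pvRef, hfe]
      · rw [if_neg hall]
        have hne : bc.filter (fun q => decide (q.2 > 0)) ≠ [] := by
          simp only [List.all_eq_true] at hall
          push Not at hall
          obtain ⟨q, hq, hqpos⟩ := hall
          simp only [ne_eq, List.filter_eq_nil_iff]
          push Not
          exact ⟨q, hq, by simpa using hqpos⟩
        have hcond : ((p :: bc).any fun q => decide (q.2 > 0) && PySem.Str.isIn "cuda" q.1)
            = ((p.1 :: (bc.filter (fun q => decide (q.2 > 0))).map Prod.fst).any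
                fun b => PySem.Str.isIn "cuda" b) := by
          simp [List.any_cons, hp, List.any_map, List.any_filter, Function.comp_def]
        rw [hcond]
        unfold pvRef
        rw [if_neg (show ¬ ((p.1 :: (bc.filter (fun q => decide (q.2 > 0))).map
              Prod.fst).isEmpty = true) by simp),
            if_neg (show ¬ ((p.1 :: (bc.filter (fun q => decide (q.2 > 0))).map
              Prod.fst).length = 1) by
                have hlen : ((bc.filter (fun q => decide (q.2 > 0))).map Prod.fst).length ≠ 0 := by
                  simpa [List.length_eq_zero_iff] using hne
                simp only [List.length_cons]; omega)]
    · simp only [List.findIdx?_cons, List.filter_cons,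
        decide_eq_true_eq, if_neg hp]
      rcases hidx : bc.findIdx? (fun q => decide (q.2 > 0)) with _ | i
      · have hfe : bc.filter (fun q => decide (q.2 > 0)) = [] := by
          simp only [List.filter_eq_nil_iff]
          intro q hq hpos
          exact absurd (List.findIdx?_eq_none_iff.mp hidx q hq) (by simpa using hpos)
        simp [hidx, pvRef, hfe]
      · simp only [hidx, Option.map_some]
        have h1 : (p :: bc).drop (i + 1 + 1) = bc.drop (i + 1) := rfl
        have h2 : (p :: bc).getD (i + 1) ("", 0) = (bc.getD i ("", 0)) := rfl
        have h3 : ((p :: bc).any fun q => decide (q.2 > 0) && PySem.Str.isIn "cuda" q.1)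
            = (bc.any fun q => decide (q.2 > 0) && PySem.Str.isIn "cuda" q.1) := by
          simp [List.any_cons, hp]
        rw [h1, h2, h3, ← ih]
        unfold summarize_distance_backend_py_alt
        rw [hidx]

-- ===== VERDICT (by name: the statement is the Claim_ definition above) =====
theorem summarize_distance_backend_py_spec : Claim_equal_summarize_distance_backend_py := by
  intro bc _ hpre
  unfold Spec_summarize_distance_backend_py
  rw [pvA_eq_ref bc hpre, pvB_eq_ref bc]
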